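-- pv_equiv track=rewrite | github.com/Pederzh/Anomaly-detection-of-pollution-emissions-using-TROPOMI-satellite-data | Tester.py | increment_image_dimension
-- ===== SOURCE A (Python) =====
-- def increment_image_dimension(matrix, factor):
--     new_matrix = []
--     for y in range(len(matrix)):
--         for i in range(factor): new_matrix.append([])
--         for x in range(len(matrix[y])):
--             for i in range(factor):
--                 for j in range(factor):
--                     new_matrix[y*factor+i].append(matrix[y][x])
--     return new_matrix
-- ===== SOURCE B (Python) =====
-- def increment_image_dimension(matrix, factor):
--     out = []
--     for row in matrix:
--         expanded = [v for v in row for _ in range(factor)]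
--         out.extend(expanded[:] for _ in range(factor))
--     return out
-- ===== Notes on version B (the rewrite author's own statement) =====
-- stated objective: simpler
-- what changed: Builds each expanded row once per source row and appends factor independent copies of it, replacing A's interleaved fill of factor parallel rows through y*factor+i index arithmetic.
import Mathlib
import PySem

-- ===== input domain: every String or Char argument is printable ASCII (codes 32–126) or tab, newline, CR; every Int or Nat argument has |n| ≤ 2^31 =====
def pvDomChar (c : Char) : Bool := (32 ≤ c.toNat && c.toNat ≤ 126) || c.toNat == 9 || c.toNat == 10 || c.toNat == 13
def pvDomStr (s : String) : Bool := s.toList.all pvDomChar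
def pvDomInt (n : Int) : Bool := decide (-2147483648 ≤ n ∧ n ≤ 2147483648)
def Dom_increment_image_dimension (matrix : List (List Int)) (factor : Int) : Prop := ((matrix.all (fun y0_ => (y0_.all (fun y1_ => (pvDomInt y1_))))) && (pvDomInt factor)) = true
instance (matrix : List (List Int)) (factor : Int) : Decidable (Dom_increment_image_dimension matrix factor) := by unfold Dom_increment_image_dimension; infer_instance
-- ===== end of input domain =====

-- B builds each expanded row once and appends factor independent copies, instead of A's
-- interleaved fill of factor parallel rows via y*factor+i index arithmetic (objective: simpler).

-- ===== PORT A =====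
def increment_image_dimension (matrix : List (List Int)) (factor : Int) : List (List Int) :=
  (PySem.List.pyRange 0 (PySem.List.len matrix) 1).foldl (fun nm y =>
    let nm := (PySem.List.pyRange 0 factor 1).foldl (fun nm _i => nm ++ [([] : List Int)]) nm
    (PySem.List.pyRange 0 (PySem.List.len (PySem.List.pyGetD matrix y [])) 1).foldl (fun nm x =>
      (PySem.List.pyRange 0 factor 1).foldl (fun nm i =>
        (PySem.List.pyRange 0 factor 1).foldl (fun nm _j =>
          PySem.List.pySetD nm (y * factor + i)
            (PySem.List.pyGetD nm (y * factor + i) [] ++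
              [PySem.List.pyGetD (PySem.List.pyGetD matrix y []) x 0])) nm) nm) nm) []

-- ===== PORT B =====
def increment_image_dimension_alt (matrix : List (List Int)) (factor : Int) : List (List Int) :=
  matrix.foldl (fun out row =>
    let expanded := row.flatMap (fun v => (PySem.List.pyRange 0 factor 1).map (fun _ => v))
    out ++ (PySem.List.pyRange 0 factor 1).map (fun _ => expanded)) []

-- ===== PRECONDITION & SPEC =====
def Spec_increment_image_dimension (matrix : List (List Int)) (factor : Int) (out : List (List Int)) : Prop := out = increment_image_dimension_alt matrix factor
instance (matrix : List (List Int)) (factor : Int) (out : List (List Int)) : Decidable (Spec_increment_image_dimension matrix factor out) := by unfold Spec_increment_image_dimension; infer_instance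

-- ===== CLAIM (what is proved, stated in full; the proofs are below) =====
def Claim_equal_increment_image_dimension : Prop := ∀ (matrix : List (List Int)) (factor : Int), Dom_increment_image_dimension matrix factor → Spec_increment_image_dimension matrix factor (increment_image_dimension matrix factor)

-- ===== LEMMAS AND PROOFS =====

-- the common closed form: each row expanded horizontally, then replicated f times
def pvExpRow (f : Nat) (row : List Int) : List Int := row.flatMap (fun v => List.replicate f v)
def pvUp (f : Nat) (m : List (List Int)) : List (List Int) := m.flatMap (fun row => List.replicate f (pvExpRow f row))

-- one append-to-row step at (Nat) index k
def pvApp (k : Nat) (v : Int) (nm : List (List Int)) : List (List Int) :=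
  nm.set k (nm.getD k [] ++ [v])

lemma pvApp_at (P suf : List (List Int)) (r : List Int) (v : Int) :
    pvApp P.length v (P ++ r :: suf) = P ++ (r ++ [v]) :: suf := by
  unfold pvApp
  simp [List.getD_eq_getElem?_getD]

-- j-loop: F appends of v to row P.length
lemma pv_jloop (F : Nat) (P suf : List (List Int)) (r : List Int) (v : Int) :
    (List.range F).foldl (fun nm _ => pvApp P.length v nm) (P ++ r :: suf)
      = P ++ (r ++ List.replicate F v) :: suf := by
  induction F generalizing r with
  | zero => simp
  | succ F ih =>
    rw [List.range_succ, List.foldl_append]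
    rw [ih]
    simp [pvApp_at, List.replicate_succ']

-- i-loop: append the block replicate F v to each of the f rows after P
lemma pv_iloop (f F : Nat) (v : Int) (P suf : List (List Int)) (r : List Int) :
    (List.range f).foldl
        (fun nm i => (List.range F).foldl (fun nm _ => pvApp (P.length + i) v nm) nm)
        (P ++ List.replicate f r ++ suf)
      = P ++ List.replicate f (r ++ List.replicate F v) ++ suf := by
  induction f generalizing suf with
  | zero => simp
  | succ f ih =>
    rw [List.range_succ, List.foldl_append]
    have hrep : List.replicate (f+1) r = List.replicate f r ++ [r] := by
      simp [List.replicate_succ']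
    rw [hrep]
    have h1 : P ++ (List.replicate f r ++ [r]) ++ suf
        = P ++ List.replicate f r ++ (r :: suf) := by simp
    rw [h1, ih (r :: suf)]
    have h2 : (P ++ List.replicate f (r ++ List.replicate F v)).length = P.length + f := by
      simp
    have h3 : P ++ List.replicate f (r ++ List.replicate F v) ++ r :: suf
        = (P ++ List.replicate f (r ++ List.replicate F v)) ++ r :: suf := by simp
    rw [h3]
    have := pv_jloop F (P ++ List.replicate f (r ++ List.replicate F v)) suf r v
    rw [h2] at this
    simp only [List.foldl_cons, List.foldl_nil] at this ⊢
    rw [this]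
    simp [List.replicate_succ']

-- x-loop over one row of values
lemma pv_xloop (f : Nat) (row : List Int) (P : List (List Int)) (r : List Int) :
    row.foldl
        (fun nm v => (List.range f).foldl
          (fun nm i => (List.range f).foldl (fun nm _ => pvApp (P.length + i) v nm) nm) nm)
        (P ++ List.replicate f r)
      = P ++ List.replicate f (r ++ pvExpRow f row) := by
  induction row generalizing r with
  | nil => simp [pvExpRow]
  | cons v row ih =>
    simp only [List.foldl_cons]
    have := pv_iloop f f v P [] r
    simp only [List.append_nil] at this
    rw [this, ih (r ++ List.replicate f v)]
    simp [pvExpRow, List.flatMap_cons]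

-- processing one whole source row appends f copies of its expansion
lemma pv_row (f : Nat) (row : List Int) (P : List (List Int)) :
    (row.foldl
        (fun nm v => (List.range f).foldl
          (fun nm i => (List.range f).foldl (fun nm _ => pvApp (P.length + i) v nm) nm) nm)
        (P ++ List.replicate f []))
      = P ++ List.replicate f (pvExpRow f row) := by
  have := pv_xloop f row P []
  simpa using this

lemma pv_length_pvUp (f : Nat) (m : List (List Int)) : (pvUp f m).length = m.length * f := by
  induction m with
  | nil => simp [pvUp]
  | cons r m ih => simp [pvUp, List.flatMap_cons, Nat.succ_mul] at ih ⊢; omega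

-- the constant map over pyRange 0 f is replicate
lemma pv_map_const {α : Type} (f : Nat) (e : α) :
    (PySem.List.pyRange 0 (f : Int) 1).map (fun _ => e) = List.replicate f e := by
  rw [PySem.List.pyRange_zero_natCast]
  simp [List.map_map, Function.comp_def, List.map_const']

-- B's port computes pvUp
lemma pv_alt_eq (m : List (List Int)) (f : Nat) :
    increment_image_dimension_alt m (f : Int) = pvUp f m := by
  unfold increment_image_dimension_alt
  rw [PySem.List.foldl_append_eq_flatMap]
  simp only [pv_map_const, List.nil_append]
  unfold pvUp pvExpRow
  rfl

-- appending f empty rows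
lemma pv_empties (f : Nat) (nm : List (List Int)) :
    (List.range f).foldl (fun nm _ => nm ++ [([] : List Int)]) nm
      = nm ++ List.replicate f [] := by
  induction f with
  | zero => simp
  | succ f ih => rw [List.range_succ, List.foldl_append]; simp [ih, List.replicate_succ']

-- A's per-row body, on the Nat side
def pvBodyRow (f : Nat) (row : List Int) (nm : List (List Int)) (y : Nat) : List (List Int) :=
  row.foldl
    (fun nm v => (List.range f).foldl
      (fun nm i => (List.range f).foldl (fun nm _ => pvApp (y * f + i) v nm) nm) nm)
    (nm ++ List.replicate f [])

lemma pv_bodyRow_eq (f : Nat) (row : List Int) (nm : List (List Int)) (y : Nat)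
    (h : nm.length = y * f) :
    pvBodyRow f row nm y = nm ++ List.replicate f (pvExpRow f row) := by
  unfold pvBodyRow
  rw [← h]
  exact pv_row f row nm

lemma pv_outer (f : Nat) (m : List (List Int)) :
    (List.range m.length).foldl (fun nm y => pvBodyRow f (m.getD y []) nm y) []
      = pvUp f m := by
  induction m using List.reverseRecOn with
  | nil => simp [pvUp]
  | append_singleton m r ih =>
    rw [List.length_append, List.length_singleton, List.range_succ, List.foldl_append]
    have hcong : (List.range m.length).foldl
        (fun nm y => pvBodyRow f ((m ++ [r]).getD y []) nm y) ([] : List (List Int))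
        = (List.range m.length).foldl (fun nm y => pvBodyRow f (m.getD y []) nm y) [] := by
      apply PySem.List.foldl_congr_mem
      intro acc y hy
      have hlt : y < m.length := List.mem_range.mp hy
      rw [List.getD_eq_getElem?_getD, List.getElem?_append_left hlt, ← List.getD_eq_getElem?_getD]
    rw [hcong, ih]
    simp only [List.foldl_cons, List.foldl_nil]
    rw [pv_bodyRow_eq f _ _ _ (pv_length_pvUp f m)]
    · simp only [List.getD_eq_getElem?_getD, List.getElem?_append_right (Nat.le_refl m.length)]
      simp [pvUp, List.flatMap_append]

lemma pv_foldl_range_getD {beta : Type} (xs : List Int) (d : Int) (F : beta → Int → beta) (init : beta) :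
    (List.range xs.length).foldl (fun a j => F a (xs.getD j d)) init = xs.foldl F init := by
  have h := PySem.List.foldl_pyRange_zero_pyGetD' xs d F init
  rw [PySem.List.pyRange_zero_natCast, List.foldl_map] at h
  simpa using h

-- A's port computes pvUp
lemma pv_a_eq (m : List (List Int)) (f : Nat) :
    increment_image_dimension m (f : Int) = pvUp f m := by
  unfold increment_image_dimension
  simp only [PySem.List.len_eq, PySem.List.pyRange_zero_natCast, List.foldl_map,
    PySem.List.pyGetD_natCast]
  rw [← pv_outer f m]
  apply PySem.List.foldl_congr_mem
  intro nm y _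
  rw [pv_empties]
  unfold pvBodyRow
  rw [← pv_foldl_range_getD (m.getD y []) 0
        (fun nm v => (List.range f).foldl
          (fun nm i => (List.range f).foldl (fun nm _ => pvApp (y * f + i) v nm) nm) nm)
        (nm ++ List.replicate f [])]
  apply PySem.List.foldl_congr_mem
  intro acc x _
  apply PySem.List.foldl_congr_mem
  intro acc2 i _
  apply PySem.List.foldl_congr_mem
  intro acc3 j _
  unfold pvApp
  simp only [← Nat.cast_mul, ← Nat.cast_add, PySem.List.pySetD_natCast, PySem.List.pyGetD_natCast]

theorem pv_main (matrix : List (List Int)) (factor : Int) :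
    increment_image_dimension matrix factor = increment_image_dimension_alt matrix factor := by
  by_cases h : factor ≤ 0
  · have hnil : PySem.List.pyRange 0 factor 1 = [] := PySem.List.pyRange_one_eq_nil h
    unfold increment_image_dimension increment_image_dimension_alt
    simp [hnil]
  · obtain ⟨f, rfl⟩ : ∃ f : Nat, factor = (f : Int) :=
      ⟨factor.toNat, (Int.toNat_of_nonneg (by omega)).symm⟩
    rw [pv_a_eq, pv_alt_eq]

-- ===== VERDICT (by name: the statement is the Claim_ definition above) =====
theorem increment_image_dimension_spec : Claim_equal_increment_image_dimension := by
  intro matrix factor _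
  unfold Spec_increment_image_dimension
  exact pv_main matrix factor
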